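-- pv_equiv track=rewrite | github.com/mathissdupont/CryptoGraph | src/cryptograph/context_extractor.py | _argument_role
-- ===== SOURCE A (Python) =====
-- def _argument_role(argument: str, index: int) -> str:
--     lowered = argument.lower()
--     if any(token in lowered for token in ["key", "password", "secret"]):
--         return "key"
--     if any(token in lowered for token in ["iv", "nonce"]):
--         return "iv"
--     if "salt" in lowered:
--         return "salt"
--     if any(token in lowered for token in ["random", "urandom", "token_bytes", "randbytes"]):
--         return "randomness"
--     if any(token in lowered for token in ["data", "payload", "message", "token", "note"]):
--         return "data"
--     return f"arg_{index}"
-- ===== SOURCE B (Python) =====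
-- _TOKENS = [
--     ("key", 0), ("password", 0), ("secret", 0),
--     ("iv", 1), ("nonce", 1),
--     ("salt", 2),
--     ("random", 3), ("urandom", 3), ("token_bytes", 3), ("randbytes", 3),
--     ("data", 4), ("payload", 4), ("message", 4), ("token", 4), ("note", 4),
-- ]
-- _ROLES = ["key", "iv", "salt", "randomness", "data"]
--
--
-- def _argument_role(argument: str, index: int) -> str:
--     # Single left-to-right pass over the positions of the lowered string,
--     # keeping the best (smallest) priority of any token that starts there.
--     lowered = argument.lower()
--     best = 5
--     for i in range(len(lowered)):
--         for token, prio in _TOKENS: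
--             if lowered.startswith(token, i):
--                 best = min(best, prio)
--     return _ROLES[best] if best < 5 else f"arg_{index}"
-- ===== Notes on version B (the rewrite author's own statement) =====
-- stated objective: alternative
-- what changed: Instead of running a separate substring search per token group with early returns, B makes a single pass over the positions of the lowered string, checking at each position which tokens start there and keeping the minimum priority in an accumulator, then maps the final priority to its role.
import Mathlib
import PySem

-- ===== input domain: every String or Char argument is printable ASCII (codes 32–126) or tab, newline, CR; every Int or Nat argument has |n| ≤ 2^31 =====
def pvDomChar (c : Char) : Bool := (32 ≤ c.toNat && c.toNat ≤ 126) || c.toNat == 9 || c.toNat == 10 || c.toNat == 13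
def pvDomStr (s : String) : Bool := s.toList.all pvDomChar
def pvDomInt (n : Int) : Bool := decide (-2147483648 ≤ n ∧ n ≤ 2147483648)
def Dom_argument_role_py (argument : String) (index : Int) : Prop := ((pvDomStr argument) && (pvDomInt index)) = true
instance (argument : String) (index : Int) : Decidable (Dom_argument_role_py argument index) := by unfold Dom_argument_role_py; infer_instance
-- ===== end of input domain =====

-- B replaces A's per-token substring searches (early-return if-chain) by a single pass over the
-- positions of the lowered string keeping the minimum matching priority (alternative decomposition).

-- ===== PORT A =====
def argument_role_py (argument : String) (index : Int) : String :=
  let lowered := PySem.Str.lower argument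
  if ["key", "password", "secret"].any (fun token => PySem.Str.isIn token lowered) then "key"
  else if ["iv", "nonce"].any (fun token => PySem.Str.isIn token lowered) then "iv"
  else if PySem.Str.isIn "salt" lowered then "salt"
  else if ["random", "urandom", "token_bytes", "randbytes"].any (fun token => PySem.Str.isIn token lowered) then "randomness"
  else if ["data", "payload", "message", "token", "note"].any (fun token => PySem.Str.isIn token lowered) then "data"
  else "arg_" ++ PySem.Int.toStr index

-- ===== PORT B =====
def pvTokens : List (List Char × Nat) :=
  [ ("key".toList, 0), ("password".toList, 0), ("secret".toList, 0),
    ("iv".toList, 1), ("nonce".toList, 1),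
    ("salt".toList, 2),
    ("random".toList, 3), ("urandom".toList, 3), ("token_bytes".toList, 3), ("randbytes".toList, 3),
    ("data".toList, 4), ("payload".toList, 4), ("message".toList, 4), ("token".toList, 4), ("note".toList, 4) ]

def pvRoles : List String := ["key", "iv", "salt", "randomness", "data"]

-- the double loop of Source B; lowered.startswith(token, i) with 0 ≤ i ≤ len is exactly
-- "token is a prefix of lowered[i:]", ported as Chars.startswith on the dropped list (exact)
def pvScan (chars : List Char) : Nat :=
  (List.range chars.length).foldl
    (fun best i =>
      pvTokens.foldl
        (fun b tp => if PySem.Chars.startswith (chars.drop i) tp.1 then min b tp.2 else b) best)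
    5

def argument_role_py_alt (argument : String) (index : Int) : String :=
  let lowered := PySem.Str.lower argument
  let best := pvScan lowered.toList
  if best < 5 then pvRoles.getD best "" else "arg_" ++ PySem.Int.toStr index

-- ===== PRECONDITION & SPEC =====
def Spec_argument_role_py (argument : String) (index : Int) (out : String) : Prop := out = argument_role_py_alt argument index
instance (argument : String) (index : Int) (out : String) : Decidable (Spec_argument_role_py argument index out) := by unfold Spec_argument_role_py; infer_instance

-- ===== CLAIM (what is proved, stated in full; the proofs are below) =====
def Claim_equal_argument_role_py : Prop := ∀ (argument : String) (index : Int), Dom_argument_role_py argument index → Spec_argument_role_py argument index (argument_role_py argument index)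

-- ===== LEMMAS AND PROOFS =====

lemma pv_foldl_le_init {β : Type} (f : Nat → β → Nat) (hf : ∀ b x, f b x ≤ b) :
    ∀ (l : List β) (b : Nat), l.foldl f b ≤ b := by
  intro l
  induction l with
  | nil => intro b; simp
  | cons x xs ih => intro b; exact le_trans (ih (f b x)) (hf b x)

lemma pv_foldl_reach {β : Type} (f : Nat → β → Nat) (hf : ∀ b x, f b x ≤ b)
    (x0 : β) (c : Nat) (hx : ∀ b, f b x0 ≤ c) :
    ∀ (l : List β) (b : Nat), x0 ∈ l → l.foldl f b ≤ c := by
  intro l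
  induction l with
  | nil => intro b h; simp at h
  | cons x xs ih =>
    intro b h
    rcases List.mem_cons.mp h with rfl | hmem
    · exact le_trans (pv_foldl_le_init f hf xs (f b x0)) (hx b)
    · exact ih (f b x) hmem

lemma pv_foldl_lb {β : Type} (f : Nat → β → Nat) (v : Nat) :
    ∀ (l : List β), (∀ b x, x ∈ l → v ≤ b → v ≤ f b x) →
      ∀ (b : Nat), v ≤ b → v ≤ l.foldl f b := by
  intro l
  induction l with
  | nil => intro _ b hb; simpa
  | cons x xs ih =>
    intro h b hb
    exact ih (fun b' x' hx' => h b' x' (List.mem_cons_of_mem _ hx'))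
      (f b x) (h b x (List.mem_cons_self ..) hb)

lemma pv_inner_le (chars : List Char) (i : Nat) :
    ∀ (b : Nat),
      pvTokens.foldl (fun b tp => if PySem.Chars.startswith (chars.drop i) tp.1 then min b tp.2 else b) b ≤ b := by
  intro b
  apply pv_foldl_le_init
  intro b' tp
  split
  · exact min_le_left _ _
  · exact le_rfl

lemma pvScan_le_five (chars : List Char) : pvScan chars ≤ 5 := by
  apply pv_foldl_le_init
  intro b i
  exact pv_inner_le chars i b

lemma pvScan_reach (chars : List Char) (tp : List Char × Nat)
    (htp : tp ∈ pvTokens) (hne : tp.1 ≠ []) (hinf : tp.1 <:+: chars) :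
    pvScan chars ≤ tp.2 := by
  have hex : ∃ j, tp.1 <+: chars.drop j :=
    (PySem.Chars.exists_prefix_drop_iff_isIn tp.1 chars).mpr
      ((PySem.Chars.isIn_iff_infix tp.1 chars).mpr hinf)
  obtain ⟨j, hj⟩ := hex
  have hjlt : j < chars.length := by
    by_contra hge
    push Not at hge
    rw [List.drop_eq_nil_of_le hge] at hj
    exact hne (List.prefix_nil.mp hj)
  apply pv_foldl_reach _ (fun b i => pv_inner_le chars i b) j tp.2
  · intro b
    apply pv_foldl_reach _ _ tp tp.2 _ _ _ htp
    · intro b' tp'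
      split
      · exact min_le_left _ _
      · exact le_rfl
    · intro b'
      rw [if_pos ((PySem.Chars.startswith_iff _ _).mpr hj)]
      exact min_le_right _ _
  · exact List.mem_range.mpr hjlt

lemma pvScan_lb (chars : List Char) (v : Nat) (hv : v ≤ 5)
    (h : ∀ tp ∈ pvTokens, tp.1 <:+: chars → v ≤ tp.2) :
    v ≤ pvScan chars := by
  apply pv_foldl_lb _ _ _ _ 5 hv
  intro b i _ hb
  apply pv_foldl_lb _ _ _ _ b hb
  intro b' tp htp hb'
  split
  case isTrue hsw =>
    have hpre : tp.1 <+: chars.drop i := (PySem.Chars.startswith_iff _ _).mp hsw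
    have hinf : tp.1 <:+: chars := hpre.isInfix.trans (chars.drop_suffix i).isInfix
    exact le_min hb' (h tp htp hinf)
  case isFalse => exact hb'

set_option maxHeartbeats 1000000 in
lemma pvScan_eq (chars : List Char) :
    pvScan chars =
      if "key".toList <:+: chars ∨ "password".toList <:+: chars ∨ "secret".toList <:+: chars then 0
      else if "iv".toList <:+: chars ∨ "nonce".toList <:+: chars then 1
      else if "salt".toList <:+: chars then 2
      else if "random".toList <:+: chars ∨ "urandom".toList <:+: chars ∨ "token_bytes".toList <:+: chars ∨ "randbytes".toList <:+: chars then 3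
      else if "data".toList <:+: chars ∨ "payload".toList <:+: chars ∨ "message".toList <:+: chars ∨ "token".toList <:+: chars ∨ "note".toList <:+: chars then 4
      else 5 := by
  have reach := fun (tok : List Char) (p : Nat) (htp : (tok, p) ∈ pvTokens)
    (hne : tok ≠ []) (hinf : tok <:+: chars) =>
      pvScan_reach chars (tok, p) htp hne hinf
  have lb := fun (v : Nat) (hv : v ≤ 5)
    (h : ∀ tp ∈ pvTokens, tp.1 <:+: chars → v ≤ tp.2) => pvScan_lb chars v hv h
  split_ifs with h0 h1 h2 h3 h4
  · rcases h0 with h | h | h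
    · exact Nat.le_zero.mp (reach "key".toList 0 (by simp [pvTokens]) (by decide) h)
    · exact Nat.le_zero.mp (reach "password".toList 0 (by simp [pvTokens]) (by decide) h)
    · exact Nat.le_zero.mp (reach "secret".toList 0 (by simp [pvTokens]) (by decide) h)
  · apply Nat.le_antisymm
    · rcases h1 with h | h
      · exact reach "iv".toList 1 (by simp [pvTokens]) (by decide) h
      · exact reach "nonce".toList 1 (by simp [pvTokens]) (by decide) h
    · apply lb 1 (by omega)
      intro tp htp hinf
      simp only [pvTokens, List.mem_cons, List.not_mem_nil, or_false] at htp
      clear reach lb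
      rcases htp with rfl|rfl|rfl|rfl|rfl|rfl|rfl|rfl|rfl|rfl|rfl|rfl|rfl|rfl|rfl <;> simp_all
  · apply Nat.le_antisymm
    · exact reach "salt".toList 2 (by simp [pvTokens]) (by decide) h2
    · apply lb 2 (by omega)
      intro tp htp hinf
      simp only [pvTokens, List.mem_cons, List.not_mem_nil, or_false] at htp
      clear reach lb
      rcases htp with rfl|rfl|rfl|rfl|rfl|rfl|rfl|rfl|rfl|rfl|rfl|rfl|rfl|rfl|rfl <;> simp_all
  · apply Nat.le_antisymm
    · rcases h3 with h | h | h | h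
      · exact reach "random".toList 3 (by simp [pvTokens]) (by decide) h
      · exact reach "urandom".toList 3 (by simp [pvTokens]) (by decide) h
      · exact reach "token_bytes".toList 3 (by simp [pvTokens]) (by decide) h
      · exact reach "randbytes".toList 3 (by simp [pvTokens]) (by decide) h
    · apply lb 3 (by omega)
      intro tp htp hinf
      simp only [pvTokens, List.mem_cons, List.not_mem_nil, or_false] at htp
      clear reach lb
      rcases htp with rfl|rfl|rfl|rfl|rfl|rfl|rfl|rfl|rfl|rfl|rfl|rfl|rfl|rfl|rfl <;> simp_all
  · apply Nat.le_antisymm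
    · rcases h4 with h | h | h | h | h
      · exact reach "data".toList 4 (by simp [pvTokens]) (by decide) h
      · exact reach "payload".toList 4 (by simp [pvTokens]) (by decide) h
      · exact reach "message".toList 4 (by simp [pvTokens]) (by decide) h
      · exact reach "token".toList 4 (by simp [pvTokens]) (by decide) h
      · exact reach "note".toList 4 (by simp [pvTokens]) (by decide) h
    · apply lb 4 (by omega)
      intro tp htp hinf
      simp only [pvTokens, List.mem_cons, List.not_mem_nil, or_false] at htp
      clear reach lb
      rcases htp with rfl|rfl|rfl|rfl|rfl|rfl|rfl|rfl|rfl|rfl|rfl|rfl|rfl|rfl|rfl <;> simp_all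
  · apply Nat.le_antisymm
    · exact pvScan_le_five chars
    · apply lb 5 le_rfl
      intro tp htp hinf
      simp only [pvTokens, List.mem_cons, List.not_mem_nil, or_false] at htp
      clear reach lb
      rcases htp with rfl|rfl|rfl|rfl|rfl|rfl|rfl|rfl|rfl|rfl|rfl|rfl|rfl|rfl|rfl <;> simp_all

-- ===== VERDICT (by name: the statement is the Claim_ definition above) =====
theorem argument_role_py_spec : Claim_equal_argument_role_py := by
  intro argument index _
  simp only [Spec_argument_role_py, argument_role_py, argument_role_py_alt,
    List.any_cons, List.any_nil, Bool.or_false]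
  rw [pvScan_eq]
  simp only [Bool.or_eq_true, PySem.Str.isIn_eq, PySem.Chars.isIn_iff_infix]
  split_ifs <;> simp_all [pvRoles]
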